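-- pv_equiv track=rewrite | github.com/pkitslaar/AdventOfCode | 2022/day 18/day_18.py | surface_area_grid
-- ===== SOURCE A (Python) =====
-- def compute_surface_area(cubes, exterior=None):
--     total_surface_area = 0
--     for c in cubes:
--         for N in [(1,0,0),(-1,0,0),(0,1,0),(0,-1,0),(0,0,1),(0,0,-1)]:
--             n_pos = tuple([sum(z) for z in zip(c,N)])
--             if not n_pos in cubes:
--                 if not exterior or n_pos in exterior:
--                     total_surface_area += 1
--     return total_surface_area
--
-- def surface_area_grid(d, part2=False):
--     cubes = {tuple(map(int,line.split(','))):1 for line in d.splitlines()}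
--     if not part2:
--         return compute_surface_area(cubes)
--     else:
--         # "region growing" - all the visited coords
--         # that are not part of the cubes are outside
--         x_coords = [c[0] for c in cubes]
--         y_coords = [c[1] for c in cubes]
--         z_coords = [c[2] for c in cubes]
--         min_x, max_x = min(x_coords)-1,max(x_coords)+1
--         min_y, max_y = min(y_coords)-1, max(y_coords)+1
--         min_z, max_z = min(z_coords)-1, max(z_coords)+1
--
--         visit_grid = set()
--         front = [(min_x,min_y, min_z)]
--         while front:
--             c = front.pop()
--             visit_grid.add(c)
--             for N in [(1,0,0),(-1,0,0),(0,1,0),(0,-1,0),(0,0,1),(0,0,-1)]: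
--                 n_pos = tuple([sum(z) for z in zip(c,N)])
--                 if not n_pos in cubes:
--                     if not n_pos in visit_grid:
--                         if min_x <= n_pos[0] <= max_x and min_y <= n_pos[1] <= max_y and min_z <= n_pos[2] <= max_z:
--                             front.append(n_pos)
--         # compute surface but only count neighbors part of the outside coords
--         return compute_surface_area(cubes, visit_grid)
-- ===== SOURCE B (Python) =====
-- DIRS = [(1,0,0),(-1,0,0),(0,1,0),(0,-1,0),(0,0,1),(0,0,-1)]
--
-- def _step(c, N):
--     return tuple(a + b for a, b in zip(c, N))
--
-- def surface_area_grid(d, part2=False):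
--     cubes = {tuple(map(int, line.split(','))) for line in d.splitlines()}
--     if not part2:
--         # each touching pair hides two faces: 6n minus twice the +axis adjacencies
--         shared = sum(1 for c in cubes for N in ((1,0,0),(0,1,0),(0,0,1))
--                      if _step(c, N) in cubes)
--         return 6 * len(cubes) - 2 * shared
--     lo = (min(c[0] for c in cubes) - 1, min(c[1] for c in cubes) - 1,
--           min(c[2] for c in cubes) - 1)
--     hi = (max(c[0] for c in cubes) + 1, max(c[1] for c in cubes) + 1,
--           max(c[2] for c in cubes) + 1)
--     # level-synchronous BFS of the exterior air, marking cells when first generated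
--     exterior = {lo}
--     frontier = [lo]
--     while frontier:
--         new = []
--         for c in frontier:
--             for N in DIRS:
--                 n = _step(c, N)
--                 if (n not in cubes and n not in exterior
--                         and lo[0] <= n[0] <= hi[0] and lo[1] <= n[1] <= hi[1]
--                         and lo[2] <= n[2] <= hi[2]):
--                     exterior.add(n)
--                     new.append(n)
--         frontier = new
--     return sum(1 for c in cubes for N in DIRS if _step(c, N) in exterior)
-- ===== Notes on version B (the rewrite author's own statement) =====
-- stated objective: alternative
-- what changed: Part 1 becomes the closed count 6*len(cubes) minus twice the positive-axis touching pairs instead of scanning all six neighbours of every cube for non-membership; part 2 replaces A's stack-based visit-on-pop flood fill (which re-pushes duplicates and then rescans cubes with the not-cube-and-in-exterior test) with a level-synchronous BFS that marks air cells when first generated, followed by a plain neighbour-in-exterior count.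
-- outside the precondition, e.g. on surface_area_grid('0,0,0,0\n1,0,0', False): A returns 11, B returns 10; on surface_area_grid('1,2,3,4', True): A returns 6, B returns 6
import Mathlib
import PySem

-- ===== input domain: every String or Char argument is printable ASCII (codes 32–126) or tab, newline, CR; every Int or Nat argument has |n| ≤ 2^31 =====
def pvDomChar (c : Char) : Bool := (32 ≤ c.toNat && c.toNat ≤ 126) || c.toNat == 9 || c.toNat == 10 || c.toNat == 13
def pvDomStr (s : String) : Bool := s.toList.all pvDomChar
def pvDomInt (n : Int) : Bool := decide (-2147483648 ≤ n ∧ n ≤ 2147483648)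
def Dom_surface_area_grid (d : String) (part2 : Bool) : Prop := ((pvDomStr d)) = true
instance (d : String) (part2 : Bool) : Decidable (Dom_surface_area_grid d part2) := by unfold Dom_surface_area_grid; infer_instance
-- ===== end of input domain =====

-- B replaces A's part-1 six-neighbour non-membership scan with the closed count 6n − 2·(positive-axis
-- touching pairs) and A's two-phase part 2 (stack DFS flood fill marking on pop, then a rescan of all
-- cubes with the not-cube-and-in-exterior test) with a level-synchronous BFS that marks air cells when
-- first generated followed by a plain neighbour-in-exterior count (objective: alternative; same cost).



-- ===== PORT A =====
-- shared helpers: a parsed cube is the tuple of its line's ints (any arity, as in Python);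
-- pvAdd is Python's zip-truncating tuple addition, pvIdx is c[i] (exact whenever i < length,
-- which Pre_ guarantees wherever the Pythons index); the box/length lemmas are cited by name
-- in the loops' termination proofs
abbrev pvCell := List Int

def pvDirs : List pvCell := [[1,0,0],[-1,0,0],[0,1,0],[0,-1,0],[0,0,1],[0,0,-1]]

def pvAdd (c N : pvCell) : pvCell := List.zipWith (· + ·) c N

def pvIdx (l : List Int) (i : Nat) : Int := l.getD i 0

def pvInBox (lo hi n : pvCell) : Bool :=
  decide (pvIdx lo 0 ≤ pvIdx n 0 ∧ pvIdx n 0 ≤ pvIdx hi 0 ∧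
    pvIdx lo 1 ≤ pvIdx n 1 ∧ pvIdx n 1 ≤ pvIdx hi 1 ∧
    pvIdx lo 2 ≤ pvIdx n 2 ∧ pvIdx n 2 ≤ pvIdx hi 2)

def pvIccZ (a b : Int) : Finset Int :=
  (Finset.range ((b + 1 - a).toNat)).map ⟨(fun k : ℕ => a + (k : Int)), by intro x y h; have h2 : a + (x:Int) = a + (y:Int) := h; omega⟩

lemma pvMem_IccZ {a b n : Int} : n ∈ pvIccZ a b ↔ a ≤ n ∧ n ≤ b := by
  simp only [pvIccZ, Finset.mem_map, Finset.mem_range, Function.Embedding.coeFn_mk]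
  constructor
  · rintro ⟨k, hk, rfl⟩; omega
  · rintro ⟨h1, h2⟩; exact ⟨(n - a).toNat, by omega, by omega⟩

def pvBox1 (lo hi : pvCell) : Finset pvCell :=
  (pvIccZ (pvIdx lo 0) (pvIdx hi 0)).map ⟨fun x => [x], by intro a b h; simpa using h⟩

def pvBox2 (lo hi : pvCell) : Finset pvCell :=
  ((pvIccZ (pvIdx lo 0) (pvIdx hi 0)) ×ˢ (pvIccZ (pvIdx lo 1) (pvIdx hi 1))).map
    ⟨fun z => [z.1, z.2], by intro a b h; simpa [Prod.ext_iff] using h⟩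

def pvBox3 (lo hi : pvCell) : Finset pvCell :=
  ((pvIccZ (pvIdx lo 0) (pvIdx hi 0)) ×ˢ
    ((pvIccZ (pvIdx lo 1) (pvIdx hi 1)) ×ˢ (pvIccZ (pvIdx lo 2) (pvIdx hi 2)))).map
    ⟨fun z => [z.1, z.2.1, z.2.2], by intro a b h; simpa [Prod.ext_iff] using h⟩

def pvLe3Box (lo hi : pvCell) : Finset pvCell :=
  {([] : pvCell)} ∪ pvBox1 lo hi ∪ pvBox2 lo hi ∪ pvBox3 lo hi

lemma pvInBox_le3_mem {lo hi n : pvCell} (hb : pvInBox lo hi n = true) (hl : n.length ≤ 3) :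
    n ∈ pvLe3Box lo hi := by
  simp only [pvInBox, decide_eq_true_eq] at hb
  simp only [pvLe3Box, Finset.mem_union, Finset.mem_singleton, pvBox1, pvBox2, pvBox3,
    Finset.mem_map, Finset.mem_product, Function.Embedding.coeFn_mk, pvMem_IccZ]
  match n, hl with
  | [], _ => exact Or.inl (Or.inl (Or.inl rfl))
  | [a], _ =>
    refine Or.inl (Or.inl (Or.inr ⟨a, ?_, rfl⟩))
    simpa [pvIdx] using And.intro hb.1 hb.2.1
  | [a, b], _ =>
    refine Or.inl (Or.inr ⟨(a, b), ?_, rfl⟩)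
    simp only [Finset.mem_product, pvMem_IccZ]
    simp [pvIdx] at hb
    exact ⟨⟨hb.1, hb.2.1⟩, hb.2.2.1, hb.2.2.2.1⟩
  | [a, b, c], _ =>
    refine Or.inr ⟨(a, b, c), ?_, rfl⟩
    simp only [Finset.mem_product, pvMem_IccZ]
    simp [pvIdx] at hb
    exact ⟨⟨hb.1, hb.2.1⟩, ⟨hb.2.2.1, hb.2.2.2.1⟩, hb.2.2.2.2⟩

lemma pvDirs_len : ∀ N ∈ pvDirs, N.length = 3 := by decide

lemma pvAdd_len_le {c N : pvCell} (hN : N ∈ pvDirs) : (pvAdd c N).length ≤ 3 := by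
  have h := pvDirs_len N hN
  simp only [pvAdd, List.length_zipWith, h]
  omega

lemma pvPushed_mem_box {lo hi c p : pvCell} (hb : pvInBox lo hi p = true)
    (hN : ∃ N ∈ pvDirs, p = pvAdd c N) : p ∈ pvLe3Box lo hi := by
  obtain ⟨N, hmem, rfl⟩ := hN
  exact pvInBox_le3_mem hb (pvAdd_len_le hmem)

lemma pvSet_not_mem_of_contains_false {s : PySem.Set pvCell} {x : pvCell}
    (h : PySem.Set.contains s x = false) : x ∉ s := by
  intro hx; rw [← PySem.Set.contains_iff] at hx; rw [h] at hx; cases hx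

-- A's push step
def pvAStep (cubes : PySem.Dict pvCell Int) (lo hi c : pvCell) (visited' : PySem.Set pvCell)
    (f : List pvCell) (N : pvCell) : List pvCell :=
  let n := pvAdd c N
  if !(cubes.contains n) && !(PySem.Set.contains visited' n) && pvInBox lo hi n then n :: f else f

lemma pvAFold_shape (cubes : PySem.Dict pvCell Int) (lo hi c : pvCell) (visited' : PySem.Set pvCell) :
    ∀ (L : List pvCell) (f0 : List pvCell),
    ∃ P : List pvCell,
      L.foldl (pvAStep cubes lo hi c visited') f0 = P ++ f0 ∧
      (∀ p ∈ P, cubes.contains p = false ∧ p ∉ visited' ∧ pvInBox lo hi p = true ∧ ∃ N ∈ L, p = pvAdd c N) ∧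
      (∀ N ∈ L, cubes.contains (pvAdd c N) = false → pvInBox lo hi (pvAdd c N) = true →
        pvAdd c N ∈ visited' ∨ pvAdd c N ∈ P ++ f0) := by
  intro L
  induction L with
  | nil => intro f0; exact ⟨[], rfl, by simp, by simp⟩
  | cons N L ih =>
    intro f0
    rw [List.foldl_cons]
    by_cases hg : (!(cubes.contains (pvAdd c N)) && !(PySem.Set.contains visited' (pvAdd c N)) && pvInBox lo hi (pvAdd c N)) = true
    · have hstep : pvAStep cubes lo hi c visited' f0 N = pvAdd c N :: f0 := by
        simp only [pvAStep]; rw [if_pos hg]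
      rw [hstep]
      obtain ⟨P, heq, hP, hcl⟩ := ih (pvAdd c N :: f0)
      simp only [Bool.and_eq_true, Bool.not_eq_true'] at hg
      have hnv : pvAdd c N ∉ visited' := pvSet_not_mem_of_contains_false hg.1.2
      refine ⟨P ++ [pvAdd c N], by simpa [List.append_assoc] using heq, ?_, ?_⟩
      · intro p hp
        rcases List.mem_append.1 hp with h | h
        · obtain ⟨a, b, d, N', hN', he⟩ := hP p h
          exact ⟨a, b, d, N', List.mem_cons_of_mem _ hN', he⟩
        · simp only [List.mem_singleton] at h
          subst h
          exact ⟨hg.1.1, hnv, hg.2, N, List.mem_cons_self .., rfl⟩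
      · intro N' hN' hc hb
        rcases List.mem_cons.1 hN' with h | h
        · subst h; right; simp
        · rcases hcl N' h hc hb with h2 | h2
          · exact Or.inl h2
          · right
            rcases List.mem_append.1 h2 with h3 | h3
            · exact List.mem_append.2 (Or.inl (List.mem_append.2 (Or.inl h3)))
            · rcases List.mem_cons.1 h3 with h4 | h4
              · rw [h4]; simp
              · simp [h4]
    · have hstep : pvAStep cubes lo hi c visited' f0 N = f0 := by
        simp only [pvAStep]; rw [if_neg hg]
      rw [hstep]
      obtain ⟨P, heq, hP, hcl⟩ := ih f0
      refine ⟨P, heq, ?_, ?_⟩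
      · intro p hp
        obtain ⟨a, b, d, N', hN', he⟩ := hP p hp
        exact ⟨a, b, d, N', List.mem_cons_of_mem _ hN', he⟩
      · intro N' hN' hc hb
        rcases List.mem_cons.1 hN' with h | h
        · subst h
          left
          cases hv : PySem.Set.contains visited' (pvAdd c N') with
          | true => exact (PySem.Set.contains_iff visited' (pvAdd c N')).1 hv
          | false => exact absurd (by simp [hc, hb, pvSet_not_mem_of_contains_false hv]) hg
        · exact hcl N' h hc hb

-- measure helper (termination only)
def pvUniv (lo hi : pvCell) (front : List pvCell) : Finset pvCell :=
  pvLe3Box lo hi ∪ front.toFinset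

def pvParseLine? (line : String) : Option pvCell :=
  (PySem.Str.split? line ",").bind (fun ps => ps.mapM PySem.Int.ofStr?)

def pvParse? (d : String) : Option (List pvCell) :=
  (PySem.Str.splitlines d).mapM pvParseLine?

def pvComputeSurfaceArea (cubes : PySem.Dict pvCell Int) (exterior : Option (PySem.Set pvCell)) : Int :=
  cubes.keys.foldl (fun acc c =>
    pvDirs.foldl (fun acc2 N =>
      if !(cubes.contains (pvAdd c N)) &&
         (match exterior with
          | none => true
          | some e => e.isEmpty || PySem.Set.contains e (pvAdd c N)) then acc2 + 1 else acc2) acc) 0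

-- A's flood-fill loop (visit on pop); stack top at the head of the list
def pvALoop (cubes : PySem.Dict pvCell Int) (lo hi : pvCell)
    (visited : PySem.Set pvCell) (front : List pvCell) : PySem.Set pvCell :=
  match front with
  | [] => visited
  | c :: rest =>
    let visited' := PySem.Set.add visited c
    let front' := pvDirs.foldl (pvAStep cubes lo hi c visited') rest
    pvALoop cubes lo hi visited' front'
termination_by ((pvUniv lo hi front \ visited.toFinset).card,
  (front.filter (fun p => decide (p ∈ visited))).length)
decreasing_by
  obtain ⟨P, heq, hP, -⟩ := pvAFold_shape cubes lo hi c (visited.add c) pvDirs rest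
  rw [heq]
  by_cases hc : c ∈ visited
  · have hv : visited.add c = visited := PySem.Set.add_of_mem hc
    rw [hv]
    have h1 : pvUniv lo hi (P ++ rest) \ visited.toFinset
        = pvUniv lo hi (c :: rest) \ visited.toFinset := by
      apply Finset.ext; intro p
      simp only [pvUniv, Finset.mem_sdiff, Finset.mem_union, List.mem_toFinset,
        List.mem_append, List.mem_cons]
      constructor
      · rintro ⟨h, hpv⟩
        refine ⟨?_, hpv⟩
        rcases h with h | h | h
        · exact Or.inl h
        · exact Or.inl (pvPushed_mem_box (hP p h).2.2.1 (hP p h).2.2.2)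
        · exact Or.inr (Or.inr h)
      · rintro ⟨h, hpv⟩
        refine ⟨?_, hpv⟩
        rcases h with h | h | h
        · exact Or.inl h
        · exact absurd (h ▸ hc) hpv
        · exact Or.inr (Or.inr h)
    rw [h1]
    apply Prod.Lex.right
    have hfil : (P ++ rest).filter (fun p => decide (p ∈ visited))
        = rest.filter (fun p => decide (p ∈ visited)) := by
      rw [List.filter_append]
      have hnil : P.filter (fun p => decide (p ∈ visited)) = [] := by
        refine List.filter_eq_nil_iff.2 (fun p hp => ?_)
        have := (hP p hp).2.1
        rw [hv] at this
        simp [this]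
      rw [hnil, List.nil_append]
    rw [hfil, List.filter_cons]
    simp only [hc, decide_true, if_pos]
    simp
  · have hv : visited.add c = visited ++ [c] := PySem.Set.add_of_not_mem hc
    apply Prod.Lex.left
    have hcmem : c ∈ pvUniv lo hi (c :: rest) \ visited.toFinset := by
      simp [pvUniv, hc]
    have hsub : pvUniv lo hi (P ++ rest) \ (visited.add c).toFinset
        ⊆ (pvUniv lo hi (c :: rest) \ visited.toFinset).erase c := by
      intro p hp
      simp only [pvUniv, hv, Finset.mem_sdiff, Finset.mem_union, Finset.mem_erase,
        List.mem_toFinset, List.mem_append, List.mem_cons] at hp ⊢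
      obtain ⟨h, hnv⟩ := hp
      have hpc : ¬ (p ∈ visited ∨ p = c ∨ p ∈ ([] : List pvCell)) := hnv
      push_neg at hpc
      refine ⟨hpc.2.1, ?_, hpc.1⟩
      rcases h with h | h | h
      · exact Or.inl h
      · exact Or.inl (pvPushed_mem_box (hP p h).2.2.1 (hP p h).2.2.2)
      · exact Or.inr (Or.inr h)
    calc (pvUniv lo hi (P ++ rest) \ (visited.add c).toFinset).card
        ≤ ((pvUniv lo hi (c :: rest) \ visited.toFinset).erase c).card :=
          Finset.card_le_card hsub
      _ < (pvUniv lo hi (c :: rest) \ visited.toFinset).card :=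
          Finset.card_erase_lt_of_mem hcmem

def surface_area_grid (d : String) (part2 : Bool) : Int :=
  match pvParse? d with
  | none => 0
  | some cells =>
    let cubes : PySem.Dict pvCell Int := cells.foldl (fun dd c => dd.insert c 1) PySem.Dict.empty
    if !part2 then pvComputeSurfaceArea cubes none
    else
      let xs := cubes.keys.map (fun c => pvIdx c 0)
      let ys := cubes.keys.map (fun c => pvIdx c 1)
      let zs := cubes.keys.map (fun c => pvIdx c 2)
      let lo : pvCell := [(PySem.List.min? xs (fun x => x)).getD 0 - 1,
        (PySem.List.min? ys (fun x => x)).getD 0 - 1,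
        (PySem.List.min? zs (fun x => x)).getD 0 - 1]
      let hi : pvCell := [(PySem.List.max? xs (fun x => x)).getD 0 + 1,
        (PySem.List.max? ys (fun x => x)).getD 0 + 1,
        (PySem.List.max? zs (fun x => x)).getD 0 + 1]
      let ext := pvALoop cubes lo hi PySem.Set.empty [lo]
      pvComputeSurfaceArea cubes (some ext)

-- ===== PORT B =====
-- B's positive axis directions for the part-1 pair count
def pvPosDirs : List pvCell := [[1,0,0],[0,1,0],[0,0,1]]

-- B's inner double loop of one BFS level: extend (exterior, new) by the unseen valid neighbours of c
def pvGrow (cubes : PySem.Set pvCell) (lo hi : pvCell)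
    (st : PySem.Set pvCell × List pvCell) (c : pvCell) : PySem.Set pvCell × List pvCell :=
  pvDirs.foldl (fun st2 N =>
    let n := pvAdd c N
    if !(PySem.Set.contains cubes n) && !(PySem.Set.contains st2.1 n) && pvInBox lo hi n then
      (PySem.Set.add st2.1 n, st2.2 ++ [n])
    else st2) st

-- B's while loop: level-synchronous BFS, fuel-bounded (the fuel is proved sufficient below)
def pvBFS (cubes : PySem.Set pvCell) (lo hi : pvCell) :
    Nat → PySem.Set pvCell → List pvCell → PySem.Set pvCell
  | 0, ext, _ => ext
  | _, ext, [] => ext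
  | fuel + 1, ext, frontier =>
    let st := frontier.foldl (pvGrow cubes lo hi) (ext, [])
    pvBFS cubes lo hi fuel st.1 st.2

def surface_area_grid_alt (d : String) (part2 : Bool) : Int :=
  match pvParse? d with
  | none => 0
  | some cells =>
    let cubes : PySem.Set pvCell := PySem.Set.ofList cells
    if !part2 then
      6 * PySem.Set.len cubes -
        2 * (cubes.map (fun c =>
          (pvPosDirs.countP (fun N => PySem.Set.contains cubes (pvAdd c N)) : Int))).sum
    else
      let lo : pvCell := [(PySem.List.min? (cubes.map (fun c => pvIdx c 0)) (fun x => x)).getD 0 - 1,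
        (PySem.List.min? (cubes.map (fun c => pvIdx c 1)) (fun x => x)).getD 0 - 1,
        (PySem.List.min? (cubes.map (fun c => pvIdx c 2)) (fun x => x)).getD 0 - 1]
      let hi : pvCell := [(PySem.List.max? (cubes.map (fun c => pvIdx c 0)) (fun x => x)).getD 0 + 1,
        (PySem.List.max? (cubes.map (fun c => pvIdx c 1)) (fun x => x)).getD 0 + 1,
        (PySem.List.max? (cubes.map (fun c => pvIdx c 2)) (fun x => x)).getD 0 + 1]
      let d1 := (pvIdx hi 0 + 1 - pvIdx lo 0).toNat
      let d2 := (pvIdx hi 1 + 1 - pvIdx lo 1).toNat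
      let d3 := (pvIdx hi 2 + 1 - pvIdx lo 2).toNat
      let fuel := 1 + d1 + d1 * d2 + d1 * d2 * d3 + 2
      let ext := pvBFS cubes lo hi fuel (PySem.Set.add PySem.Set.empty lo) [lo]
      (cubes.map (fun c =>
        (pvDirs.countP (fun N => PySem.Set.contains ext (pvAdd c N)) : Int))).sum

-- ===== PRECONDITION & SPEC =====
-- Pre_ restricts to the task's natural domain: every line parses as comma-separated ints and all
-- lines have the same arity (on unparseable lines A raises ValueError; on MIXED arities A's
-- zip-truncated neighbour arithmetic mixes dimensions and its value is an accident of truncation),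
-- and for part2 the input is nonempty with arity exactly 3 (A raises on min([]) / c[2] otherwise,
-- and its 3-D flood fill over non-3-D cubes is likewise accidental).
def Pre_surface_area_grid (d : String) (part2 : Bool) : Prop :=
  match pvParse? d with
  | none => False
  | some cells =>
    (∀ c ∈ cells, ∀ c' ∈ cells, c.length = c'.length) ∧
    (part2 = true → cells ≠ [] ∧ ∀ c ∈ cells, c.length = 3)

instance (d : String) (part2 : Bool) : Decidable (Pre_surface_area_grid d part2) := by
  unfold Pre_surface_area_grid
  cases pvParse? d <;> infer_instance

def pvWitness_surface_area_grid : String × Bool := ("1,1,1", true)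

def Spec_surface_area_grid (d : String) (part2 : Bool) (out : Int) : Prop := out = surface_area_grid_alt d part2
instance (d : String) (part2 : Bool) (out : Int) : Decidable (Spec_surface_area_grid d part2 out) := by unfold Spec_surface_area_grid; infer_instance

-- ===== CLAIM (what is proved, stated in full; the proofs are below) =====
def Claim_equal_surface_area_grid : Prop := ∀ (d : String) (part2 : Bool), Dom_surface_area_grid d part2 → Pre_surface_area_grid d part2 → Spec_surface_area_grid d part2 (surface_area_grid d part2)

-- ===== LEMMAS AND PROOFS =====

inductive pvReach (Ks : List pvCell) (lo hi start : pvCell) : pvCell → Prop where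
  | base : pvReach Ks lo hi start start
  | step {c N : pvCell} : pvReach Ks lo hi start c → N ∈ pvDirs → pvAdd c N ∉ Ks →
      pvInBox lo hi (pvAdd c N) = true → pvReach Ks lo hi start (pvAdd c N)

lemma pvDict_contains_false {d : PySem.Dict pvCell Int} {n : pvCell} :
    d.contains n = false ↔ n ∉ d.keys := by
  rw [← PySem.Dict.contains_iff_mem_keys]
  cases d.contains n <;> simp

lemma pvSet_contains_false {s : PySem.Set pvCell} {n : pvCell} :
    PySem.Set.contains s n = false ↔ n ∉ s := by
  rw [← PySem.Set.contains_iff]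
  cases PySem.Set.contains s n <;> simp

lemma pvReach_mem_of_closed {Ks : List pvCell} {lo hi start : pvCell} {S : List pvCell}
    (hs : start ∈ S)
    (hcl : ∀ v ∈ S, ∀ N ∈ pvDirs, pvAdd v N ∉ Ks → pvInBox lo hi (pvAdd v N) = true →
      pvAdd v N ∈ S) :
    ∀ p, pvReach Ks lo hi start p → p ∈ S := by
  intro p h
  induction h with
  | base => exact hs
  | step _ hN hk hb ih => exact hcl _ ih _ hN hk hb

theorem pvALoop_main (cubes : PySem.Dict pvCell Int) (lo hi start : pvCell)
    (visited : PySem.Set pvCell) (front : List pvCell)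
    (h0 : start ∈ visited ∨ start ∈ front)
    (h1 : ∀ v ∈ visited, pvReach cubes.keys lo hi start v)
    (h2 : ∀ f ∈ front, pvReach cubes.keys lo hi start f)
    (h3 : ∀ v ∈ visited, ∀ N ∈ pvDirs, pvAdd v N ∉ cubes.keys →
      pvInBox lo hi (pvAdd v N) = true → (pvAdd v N ∈ visited ∨ pvAdd v N ∈ front)) :
    (∀ p ∈ visited, p ∈ pvALoop cubes lo hi visited front) ∧
    (∀ p ∈ front, p ∈ pvALoop cubes lo hi visited front) ∧
    (∀ p ∈ pvALoop cubes lo hi visited front, pvReach cubes.keys lo hi start p) ∧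
    (∀ v ∈ pvALoop cubes lo hi visited front, ∀ N ∈ pvDirs, pvAdd v N ∉ cubes.keys →
      pvInBox lo hi (pvAdd v N) = true → pvAdd v N ∈ pvALoop cubes lo hi visited front) := by
  revert h0 h1 h2 h3
  induction visited, front using pvALoop.induct cubes lo hi with
  | case1 visited =>
    intro h0 h1 h2 h3
    rw [pvALoop]
    refine ⟨fun p hp => hp, by simp, h1, ?_⟩
    intro v hv N hN hk hb
    rcases h3 v hv N hN hk hb with h | h
    · exact h
    · exact absurd h (List.not_mem_nil)
  | case2 visited c rest visited' front' ih =>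
    intro h0 h1 h2 h3
    simp only [visited', front'] at ih
    have hstep : pvALoop cubes lo hi visited (c :: rest) =
        pvALoop cubes lo hi (visited.add c)
          (pvDirs.foldl (pvAStep cubes lo hi c (visited.add c)) rest) := by
      rw [pvALoop]
    obtain ⟨P, heq, hP, hcl⟩ := pvAFold_shape cubes lo hi c (visited.add c) pvDirs rest
    have hcR : pvReach cubes.keys lo hi start c := h2 c (List.mem_cons_self ..)
    have hmemv' : ∀ v, v ∈ visited.add c ↔ v ∈ visited ∨ v = c := fun v =>
      PySem.Set.mem_add visited c v
    have h1' : ∀ v ∈ visited.add c, pvReach cubes.keys lo hi start v := by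
      intro v hv
      rcases (hmemv' v).1 hv with h | h
      · exact h1 v h
      · exact h ▸ hcR
    have h2' : ∀ f ∈ pvDirs.foldl (pvAStep cubes lo hi c (visited.add c)) rest,
        pvReach cubes.keys lo hi start f := by
      intro f hf
      rw [heq] at hf
      rcases List.mem_append.1 hf with h | h
      · obtain ⟨hc1, hc2, hc3, N, hN, hfe⟩ := hP f h
        exact hfe ▸ pvReach.step hcR hN (hfe ▸ pvDict_contains_false.1 hc1) (hfe ▸ hc3)
      · exact h2 f (List.mem_cons_of_mem _ h)
    have h3' : ∀ v ∈ visited.add c, ∀ N ∈ pvDirs, pvAdd v N ∉ cubes.keys →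
        pvInBox lo hi (pvAdd v N) = true →
        (pvAdd v N ∈ visited.add c ∨
          pvAdd v N ∈ pvDirs.foldl (pvAStep cubes lo hi c (visited.add c)) rest) := by
      intro v hv N hN hk hb
      rcases (hmemv' v).1 hv with h | h
      · rcases h3 v h N hN hk hb with h4 | h4
        · exact Or.inl ((hmemv' _).2 (Or.inl h4))
        · rcases List.mem_cons.1 h4 with h5 | h5
          · exact Or.inl ((hmemv' _).2 (Or.inr h5))
          · refine Or.inr ?_
            rw [heq]
            exact List.mem_append.2 (Or.inr h5)
      · subst h
        rcases hcl N hN (pvDict_contains_false.2 hk) hb with h4 | h4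
        · exact Or.inl h4
        · refine Or.inr ?_
          rw [heq]
          exact h4
    have h0' : start ∈ visited.add c ∨
        start ∈ pvDirs.foldl (pvAStep cubes lo hi c (visited.add c)) rest := by
      rcases h0 with h | h
      · exact Or.inl ((hmemv' _).2 (Or.inl h))
      · rcases List.mem_cons.1 h with h4 | h4
        · exact Or.inl ((hmemv' _).2 (Or.inr h4))
        · refine Or.inr ?_
          rw [heq]
          exact List.mem_append.2 (Or.inr h4)
    obtain ⟨ihA, ihB, ihC, ihD⟩ := ih h0' h1' h2' h3'
    rw [hstep]
    refine ⟨?_, ?_, ihC, ihD⟩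
    · intro p hp
      exact ihA p ((hmemv' _).2 (Or.inl hp))
    · intro p hp
      rcases List.mem_cons.1 hp with h | h
      · exact ihA p ((hmemv' _).2 (Or.inr h))
      · refine ihB p ?_
        rw [heq]
        exact List.mem_append.2 (Or.inr h)

lemma pvALoop_run (cubes : PySem.Dict pvCell Int) (lo hi : pvCell) :
    ∀ p, p ∈ pvALoop cubes lo hi PySem.Set.empty [lo] ↔ pvReach cubes.keys lo hi lo p := by
  have hempty : (PySem.Set.empty : PySem.Set pvCell) = [] := rfl
  have h := pvALoop_main cubes lo hi lo PySem.Set.empty [lo]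
    (Or.inr (List.mem_cons_self ..))
    (by rw [hempty]; intro v hv; exact absurd hv (List.not_mem_nil))
    (by intro f hf; rcases List.mem_cons.1 hf with h | h;
        · exact h ▸ pvReach.base
        · exact absurd h (List.not_mem_nil))
    (by rw [hempty]; intro v hv; exact absurd hv (List.not_mem_nil))
  obtain ⟨-, h2, h3, h4⟩ := h
  intro p
  constructor
  · exact h3 p
  · exact pvReach_mem_of_closed (h2 lo (List.mem_cons_self ..)) h4 p

-- B-side: shape of one BFS level (the pvGrow folds)
lemma pvGrow_dirs_shape (cubes : PySem.Set pvCell) (lo hi c : pvCell) :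
    ∀ (L : List pvCell) (ext : PySem.Set pvCell) (acc : List pvCell),
    ∃ P : List pvCell,
      L.foldl (fun st2 N =>
        let n := pvAdd c N
        if !(PySem.Set.contains cubes n) && !(PySem.Set.contains st2.1 n) && pvInBox lo hi n then
          (PySem.Set.add st2.1 n, st2.2 ++ [n])
        else st2) (ext, acc) = (ext ++ P, acc ++ P) ∧ P.Nodup ∧
      (∀ p ∈ P, p ∉ ext ∧ PySem.Set.contains cubes p = false ∧ pvInBox lo hi p = true ∧
        ∃ N ∈ L, p = pvAdd c N) ∧
      (∀ N ∈ L, PySem.Set.contains cubes (pvAdd c N) = false → pvInBox lo hi (pvAdd c N) = true →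
        pvAdd c N ∈ ext ++ P) := by
  intro L
  induction L with
  | nil => intro ext acc; exact ⟨[], by simp, by simp, by simp, by simp⟩
  | cons N L ih =>
    intro ext acc
    rw [List.foldl_cons]
    by_cases hg : (!(PySem.Set.contains cubes (pvAdd c N)) && !(PySem.Set.contains ext (pvAdd c N))
        && pvInBox lo hi (pvAdd c N)) = true
    · simp only [hg, if_pos]
      simp only [Bool.and_eq_true, Bool.not_eq_true'] at hg
      have hnv : pvAdd c N ∉ ext := pvSet_not_mem_of_contains_false hg.1.2
      have hadd : PySem.Set.add ext (pvAdd c N) = ext ++ [pvAdd c N] :=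
        PySem.Set.add_of_not_mem hnv
      rw [hadd]
      obtain ⟨P, heq, hnd, hP, hcl⟩ := ih (ext ++ [pvAdd c N]) (acc ++ [pvAdd c N])
      refine ⟨pvAdd c N :: P, ?_, ?_, ?_, ?_⟩
      · rw [heq]; simp [List.append_assoc]
      · refine List.nodup_cons.2 ⟨fun hmem => ?_, hnd⟩
        exact (hP _ hmem).1 (by simp)
      · intro p hp
        rcases List.mem_cons.1 hp with h | h
        · subst h
          exact ⟨hnv, hg.1.1, hg.2, N, List.mem_cons_self .., rfl⟩
        · obtain ⟨h3, h4, h5, N', hN', he⟩ := hP p h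
          exact ⟨fun hm => h3 (by simp [hm]), h4, h5, N', List.mem_cons_of_mem _ hN', he⟩
      · intro N' hN' hc hb
        rcases List.mem_cons.1 hN' with h | h
        · subst h; simp
        · have := hcl N' h hc hb
          simpa [List.append_assoc] using this
    · simp only [Bool.not_eq_true] at hg
      simp only [hg, Bool.false_eq_true, if_false]
      obtain ⟨P, heq, hnd, hP, hcl⟩ := ih ext acc
      refine ⟨P, heq, hnd, ?_, ?_⟩
      · intro p hp
        obtain ⟨h3, h4, h5, N', hN', he⟩ := hP p hp
        exact ⟨h3, h4, h5, N', List.mem_cons_of_mem _ hN', he⟩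
      intro N' hN' hc hb
      rcases List.mem_cons.1 hN' with h | h
      · subst h
        refine List.mem_append.2 (Or.inl ?_)
        cases hv : PySem.Set.contains ext (pvAdd c N') with
        | true => exact (PySem.Set.contains_iff ext (pvAdd c N')).1 hv
        | false =>
          simp [hb, hc, hv] at hg
          exact hg (pvSet_not_mem_of_contains_false hc)
      · exact hcl N' h hc hb

lemma pvGrow_fold_shape (cubes : PySem.Set pvCell) (lo hi : pvCell) :
    ∀ (F : List pvCell) (ext : PySem.Set pvCell) (acc : List pvCell),
    ∃ P : List pvCell,
      F.foldl (pvGrow cubes lo hi) (ext, acc) = (ext ++ P, acc ++ P) ∧ P.Nodup ∧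
      (∀ p ∈ P, p ∉ ext ∧ PySem.Set.contains cubes p = false ∧ pvInBox lo hi p = true ∧
        ∃ c ∈ F, ∃ N ∈ pvDirs, p = pvAdd c N) ∧
      (∀ c ∈ F, ∀ N ∈ pvDirs, PySem.Set.contains cubes (pvAdd c N) = false →
        pvInBox lo hi (pvAdd c N) = true → pvAdd c N ∈ ext ++ P) := by
  intro F
  induction F with
  | nil => intro ext acc; exact ⟨[], by simp, by simp, by simp, by simp⟩
  | cons c F ih =>
    intro ext acc
    rw [List.foldl_cons]
    obtain ⟨P1, heq1, hnd1, hP1, hcl1⟩ := pvGrow_dirs_shape cubes lo hi c pvDirs ext acc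
    have hgrow : pvGrow cubes lo hi (ext, acc) c = (ext ++ P1, acc ++ P1) := heq1
    rw [hgrow]
    obtain ⟨P2, heq2, hnd2, hP2, hcl2⟩ := ih (ext ++ P1) (acc ++ P1)
    refine ⟨P1 ++ P2, ?_, ?_, ?_, ?_⟩
    · rw [heq2]; simp [List.append_assoc]
    · refine List.Nodup.append hnd1 hnd2 (fun a ha1 ha2 => ?_)
      exact (hP2 a ha2).1 (List.mem_append.2 (Or.inr ha1))
    · intro p hp
      rcases List.mem_append.1 hp with h | h
      · obtain ⟨ha, hb2, hc2, N, hN, he⟩ := hP1 p h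
        exact ⟨ha, hb2, hc2, c, List.mem_cons_self .., N, hN, he⟩
      · obtain ⟨ha, hb2, hc2, c', hc', N, hN, he⟩ := hP2 p h
        exact ⟨fun hm => ha (List.mem_append.2 (Or.inl hm)), hb2, hc2,
          c', List.mem_cons_of_mem _ hc', N, hN, he⟩
    · intro v hv N hN hc hb
      rcases List.mem_cons.1 hv with h | h
      · subst h
        rcases List.mem_append.1 (hcl1 N hN hc hb) with h2 | h2
        · exact List.mem_append.2 (Or.inl h2)
        · exact List.mem_append.2 (Or.inr (List.mem_append.2 (Or.inl h2)))
      · have := hcl2 v h N hN hc hb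
        simpa [List.append_assoc] using this

lemma pvBFS_nil (cubes : PySem.Set pvCell) (lo hi : pvCell) :
    ∀ (fuel : Nat) (ext : PySem.Set pvCell), pvBFS cubes lo hi fuel ext [] = ext := by
  intro fuel ext
  cases fuel <;> rfl

lemma pvOrigin_len_le3 {p : pvCell} {F : List pvCell}
    (h : ∃ c ∈ F, ∃ N ∈ pvDirs, p = pvAdd c N) : p.length ≤ 3 := by
  obtain ⟨c, -, N, hN, rfl⟩ := h
  exact pvAdd_len_le hN

theorem pvBFS_main (cubes : PySem.Set pvCell) (lo hi start : pvCell) :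
    ∀ (fuel : Nat) (ext : PySem.Set pvCell) (frontier : List pvCell),
    ext.Nodup →
    (∀ p ∈ ext, p ∈ pvLe3Box lo hi) →
    (∀ f ∈ frontier, f ∈ ext) →
    start ∈ ext →
    (∀ v ∈ ext, pvReach cubes lo hi start v) →
    (∀ v ∈ ext, v ∈ frontier ∨ (∀ N ∈ pvDirs, pvAdd v N ∉ cubes →
      pvInBox lo hi (pvAdd v N) = true → pvAdd v N ∈ ext)) →
    (pvLe3Box lo hi).card + 1 ≤ fuel + ext.length →
    (∀ p ∈ ext, p ∈ pvBFS cubes lo hi fuel ext frontier) ∧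
    (∀ p ∈ pvBFS cubes lo hi fuel ext frontier, pvReach cubes lo hi start p) ∧
    (∀ v ∈ pvBFS cubes lo hi fuel ext frontier, ∀ N ∈ pvDirs, pvAdd v N ∉ cubes →
      pvInBox lo hi (pvAdd v N) = true → pvAdd v N ∈ pvBFS cubes lo hi fuel ext frontier) := by
  intro fuel
  induction fuel with
  | zero =>
    intro ext frontier hnd hbox _ _ _ _ hfuel
    exfalso
    have hsub : ext.toFinset ⊆ pvLe3Box lo hi := fun p hp => hbox p (List.mem_toFinset.1 hp)
    have := Finset.card_le_card hsub
    rw [List.toFinset_card_of_nodup hnd] at this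
    omega
  | succ fuel ih =>
    intro ext frontier hnd hbox hfe hst hreach hinv hfuel
    match frontier with
    | [] =>
      rw [pvBFS_nil]
      refine ⟨fun p hp => hp, hreach, ?_⟩
      intro v hv N hN hk hb
      rcases hinv v hv with h | h
      · exact absurd h (List.not_mem_nil)
      · exact h N hN hk hb
    | c :: rest =>
      obtain ⟨P, heq, hndP, hP, hcl⟩ := pvGrow_fold_shape cubes lo hi (c :: rest) ext []
      have hstep : pvBFS cubes lo hi (fuel + 1) ext (c :: rest)
          = pvBFS cubes lo hi fuel (ext ++ P) P := by
        show pvBFS cubes lo hi fuel ((c :: rest).foldl (pvGrow cubes lo hi) (ext, [])).1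
          ((c :: rest).foldl (pvGrow cubes lo hi) (ext, [])).2
          = pvBFS cubes lo hi fuel (ext ++ P) P
        rw [heq]
        simp
      have hclosed : ∀ v ∈ c :: rest, ∀ N ∈ pvDirs, pvAdd v N ∉ cubes →
          pvInBox lo hi (pvAdd v N) = true → pvAdd v N ∈ ext ++ P := by
        intro v hv N hN hk hb
        exact hcl v hv N hN (pvSet_contains_false.2 hk) hb
      cases P with
      | nil =>
        rw [hstep, pvBFS_nil]
        have hea : ext ++ ([] : List pvCell) = ext := by simp
        rw [hea]
        refine ⟨fun p hp => hp, hreach, ?_⟩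
        intro v hv N hN hk hb
        rcases hinv v hv with h | h
        · have := hclosed v h N hN hk hb
          simpa using this
        · exact h N hN hk hb
      | cons q Q =>
        rw [hstep]
        have hnd' : (ext ++ q :: Q).Nodup :=
          List.Nodup.append hnd hndP (fun a ha hap => (hP a hap).1 ha)
        have hbox' : ∀ p ∈ ext ++ q :: Q, p ∈ pvLe3Box lo hi := by
          intro p hp
          rcases List.mem_append.1 hp with h | h
          · exact hbox p h
          · exact pvInBox_le3_mem (hP p h).2.2.1 (pvOrigin_len_le3 (hP p h).2.2.2)
        have hreach' : ∀ v ∈ ext ++ q :: Q, pvReach cubes lo hi start v := by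
          intro v hv
          rcases List.mem_append.1 hv with h | h
          · exact hreach v h
          · obtain ⟨-, hc2, hb2, c', hc', N, hN, he⟩ := hP v h
            have hcr : pvReach cubes lo hi start c' := hreach c' (hfe c' hc')
            have hk : pvAdd c' N ∉ cubes := pvSet_not_mem_of_contains_false (he ▸ hc2)
            have hb : pvInBox lo hi (pvAdd c' N) = true := he ▸ hb2
            exact he ▸ pvReach.step hcr hN hk hb
        have hinv' : ∀ v ∈ ext ++ q :: Q, v ∈ q :: Q ∨ (∀ N ∈ pvDirs, pvAdd v N ∉ cubes →
            pvInBox lo hi (pvAdd v N) = true → pvAdd v N ∈ ext ++ q :: Q) := by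
          intro v hv
          rcases List.mem_append.1 hv with h | h
          · rcases hinv v h with h2 | h2
            · exact Or.inr (fun N hN hk hb => hclosed v h2 N hN hk hb)
            · exact Or.inr (fun N hN hk hb => List.mem_append.2 (Or.inl (h2 N hN hk hb)))
          · exact Or.inl h
        have hfuel' : (pvLe3Box lo hi).card + 1 ≤ fuel + (ext ++ q :: Q).length := by
          simp only [List.length_append, List.length_cons]
          omega
        obtain ⟨ih1, ih2, ih3⟩ := ih (ext ++ q :: Q) (q :: Q) hnd' hbox'
          (fun f hf => List.mem_append.2 (Or.inr hf))
          (List.mem_append.2 (Or.inl hst)) hreach' hinv' hfuel'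
        exact ⟨fun p hp => ih1 p (List.mem_append.2 (Or.inl hp)), ih2, ih3⟩

lemma pvReach_not_mem {Ks : List pvCell} {lo hi start : pvCell} (hstart : start ∉ Ks) :
    ∀ p, pvReach Ks lo hi start p → p ∉ Ks := by
  intro p h
  cases h with
  | base => exact hstart
  | step _ _ hk _ => exact hk

def pvNegDirs : List pvCell := [[-1,0,0],[0,-1,0],[0,0,-1]]

def pvNeg (N : pvCell) : pvCell := N.map (fun x => -x)

lemma pvPos_nodup : pvPosDirs.Nodup := by decide
lemma pvNegD_nodup : pvNegDirs.Nodup := by decide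
lemma pvNeg_mem_pos : ∀ N ∈ pvNegDirs, pvNeg N ∈ pvPosDirs := by decide
lemma pvNeg_mem_neg : ∀ N ∈ pvPosDirs, pvNeg N ∈ pvNegDirs := by decide
lemma pvNeg_neg_pos : ∀ N ∈ pvPosDirs, pvNeg (pvNeg N) = N := by decide
lemma pvNeg_neg_neg : ∀ N ∈ pvNegDirs, pvNeg (pvNeg N) = N := by decide
lemma pvPosDirs_len : ∀ N ∈ pvPosDirs, N.length = 3 := by decide
lemma pvNegDirs_len : ∀ N ∈ pvNegDirs, N.length = 3 := by decide

lemma pvAdd_cancel : ∀ (c N : pvCell), c.length ≤ N.length →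
    pvAdd (pvAdd c N) (pvNeg N) = c := by
  intro c
  induction c with
  | nil => intro N _; simp [pvAdd]
  | cons a t ih =>
    intro N h
    cases N with
    | nil => simp at h
    | cons n M =>
      show (a + n + -n) :: pvAdd (pvAdd t M) (pvNeg M) = a :: t
      rw [ih M (by simpa using h)]
      simp

lemma pvDirs_perm : pvDirs.Perm (pvPosDirs ++ pvNegDirs) := by decide

lemma pv_countP_split (p : pvCell → Bool) :
    pvDirs.countP p = pvPosDirs.countP p + pvNegDirs.countP p := by
  rw [pvDirs_perm.countP_eq, List.countP_append]

lemma pv_countP_card {α : Type} [DecidableEq α] {l : List α} (hl : l.Nodup) (p : α → Bool) :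
    (l.toFinset.filter (fun x => p x = true)).card = l.countP p := by
  rw [← List.toFinset_filter, List.toFinset_card_of_nodup (hl.filter p),
    List.countP_eq_length_filter]

lemma pv_sum_card_filter {α β : Type} [DecidableEq α] [DecidableEq β]
    (s : Finset α) (t : Finset β) (q : α → β → Prop) [∀ a b, Decidable (q a b)] :
    ∑ c ∈ s, (t.filter (fun b => q c b)).card = ((s ×ˢ t).filter (fun z => q z.1 z.2)).card := by
  rw [Finset.card_filter, Finset.sum_product]
  refine Finset.sum_congr rfl (fun c _ => ?_)
  rw [Finset.card_filter]

lemma pv_flip_card2 (S : List pvCell) (hlen : ∀ c ∈ S, c.length ≤ 3) :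
    ((S.toFinset ×ˢ pvNegDirs.toFinset).filter (fun z => pvAdd z.1 z.2 ∈ S)).card =
    ((S.toFinset ×ˢ pvPosDirs.toFinset).filter (fun z => pvAdd z.1 z.2 ∈ S)).card := by
  apply Finset.card_nbij' (fun z => (pvAdd z.1 z.2, pvNeg z.2)) (fun z => (pvAdd z.1 z.2, pvNeg z.2))
  · intro z hz
    simp only [Finset.coe_filter, Set.mem_setOf_eq, Finset.mem_product, List.mem_toFinset] at hz ⊢
    obtain ⟨⟨hz1, hz2⟩, hz3⟩ := hz
    refine ⟨⟨hz3, pvNeg_mem_pos _ hz2⟩, ?_⟩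
    rw [pvAdd_cancel z.1 z.2 (by rw [pvNegDirs_len _ hz2]; exact hlen _ hz1)]
    exact hz1
  · intro z hz
    simp only [Finset.coe_filter, Set.mem_setOf_eq, Finset.mem_product, List.mem_toFinset] at hz ⊢
    obtain ⟨⟨hz1, hz2⟩, hz3⟩ := hz
    refine ⟨⟨hz3, pvNeg_mem_neg _ hz2⟩, ?_⟩
    rw [pvAdd_cancel z.1 z.2 (by rw [pvPosDirs_len _ hz2]; exact hlen _ hz1)]
    exact hz1
  · intro z hz
    simp only [Finset.coe_filter, Set.mem_setOf_eq, Finset.mem_product, List.mem_toFinset] at hz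
    obtain ⟨⟨hz1, hz2⟩, -⟩ := hz
    have h1 : pvAdd (pvAdd z.1 z.2) (pvNeg z.2) = z.1 :=
      pvAdd_cancel z.1 z.2 (by rw [pvNegDirs_len _ hz2]; exact hlen _ hz1)
    have h2 : pvNeg (pvNeg z.2) = z.2 := pvNeg_neg_neg _ hz2
    simp [h1, h2]
  · intro z hz
    simp only [Finset.coe_filter, Set.mem_setOf_eq, Finset.mem_product, List.mem_toFinset] at hz
    obtain ⟨⟨hz1, hz2⟩, -⟩ := hz
    have h1 : pvAdd (pvAdd z.1 z.2) (pvNeg z.2) = z.1 :=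
      pvAdd_cancel z.1 z.2 (by rw [pvPosDirs_len _ hz2]; exact hlen _ hz1)
    have h2 : pvNeg (pvNeg z.2) = z.2 := pvNeg_neg_pos _ hz2
    simp [h1, h2]

lemma pv_flip_sum (S : List pvCell) (hS : S.Nodup)
    (hunif : ∀ c ∈ S, ∀ c' ∈ S, c.length = c'.length) :
    ∑ c ∈ S.toFinset, pvNegDirs.countP (fun N => decide (pvAdd c N ∈ S))
      = ∑ c ∈ S.toFinset, pvPosDirs.countP (fun N => decide (pvAdd c N ∈ S)) := by
  by_cases hL : ∀ c ∈ S, c.length ≤ 3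
  · have hcv : ∀ (M : List pvCell), M.Nodup → ∀ c : pvCell,
        M.countP (fun N => decide (pvAdd c N ∈ S))
          = (M.toFinset.filter (fun N => pvAdd c N ∈ S)).card := by
      intro M hM c
      rw [← pv_countP_card hM (fun N => decide (pvAdd c N ∈ S))]
      refine congrArg Finset.card (Finset.filter_congr (fun N _ => ?_))
      simp
    calc ∑ c ∈ S.toFinset, pvNegDirs.countP (fun N => decide (pvAdd c N ∈ S))
        = ∑ c ∈ S.toFinset, (pvNegDirs.toFinset.filter (fun N => pvAdd c N ∈ S)).card :=
          Finset.sum_congr rfl (fun c _ => hcv pvNegDirs pvNegD_nodup c)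
      _ = ((S.toFinset ×ˢ pvNegDirs.toFinset).filter (fun z => pvAdd z.1 z.2 ∈ S)).card :=
          pv_sum_card_filter S.toFinset pvNegDirs.toFinset (fun c N => pvAdd c N ∈ S)
      _ = ((S.toFinset ×ˢ pvPosDirs.toFinset).filter (fun z => pvAdd z.1 z.2 ∈ S)).card :=
          pv_flip_card2 S hL
      _ = ∑ c ∈ S.toFinset, (pvPosDirs.toFinset.filter (fun N => pvAdd c N ∈ S)).card :=
          (pv_sum_card_filter S.toFinset pvPosDirs.toFinset (fun c N => pvAdd c N ∈ S)).symm
      _ = ∑ c ∈ S.toFinset, pvPosDirs.countP (fun N => decide (pvAdd c N ∈ S)) :=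
          Finset.sum_congr rfl (fun c _ => (hcv pvPosDirs pvPos_nodup c).symm)
  · push_neg at hL
    obtain ⟨c0, hc0, hgt⟩ := hL
    have hall : ∀ c ∈ S, 3 < c.length := by
      intro c hc
      rw [hunif c hc c0 hc0]
      omega
    have hzero : ∀ c ∈ S, ∀ N : pvCell, N.length = 3 → pvAdd c N ∉ S := by
      intro c hc N hN hmem
      have h1 := hall _ hmem
      have h2 : (pvAdd c N).length = min c.length 3 := by
        simp [pvAdd, List.length_zipWith, hN]
      have h3 := hall c hc
      omega
    have hz1 : ∀ c ∈ S.toFinset, pvNegDirs.countP (fun N => decide (pvAdd c N ∈ S)) = 0 := by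
      intro c hc
      refine List.countP_eq_zero.2 (fun N hN => ?_)
      simp [hzero c (List.mem_toFinset.1 hc) N (pvNegDirs_len N hN)]
    have hz2 : ∀ c ∈ S.toFinset, pvPosDirs.countP (fun N => decide (pvAdd c N ∈ S)) = 0 := by
      intro c hc
      refine List.countP_eq_zero.2 (fun N hN => ?_)
      simp [hzero c (List.mem_toFinset.1 hc) N (pvPosDirs_len N hN)]
    rw [Finset.sum_congr rfl hz1, Finset.sum_congr rfl hz2]

lemma pvKeys_eq (cells : List pvCell) :
    (cells.foldl (fun dd c => dd.insert c (1 : Int)) PySem.Dict.empty).keys =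
      PySem.Set.ofList cells := by
  have h := PySem.Dict.keys_foldl_insert cells (fun _ _ => (1 : Int)) PySem.Dict.empty
  simpa [PySem.Dict.keys_empty, PySem.Set.update_nil_left] using h

lemma pv_sum_compl (l : List pvCell) (q : pvCell → pvCell → Bool) :
    (l.map (fun c => (pvDirs.countP (fun N => !(q c N)) : Int))).sum
      = 6 * (l.length : Int) - (l.map (fun c => (pvDirs.countP (fun N => q c N) : Int))).sum := by
  induction l with
  | nil => simp
  | cons c t ih =>
    simp only [List.map_cons, List.sum_cons, List.length_cons, ih]
    have h6 : pvDirs.countP (fun N => q c N) + pvDirs.countP (fun N => !(q c N)) = 6 := by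
      have h := List.length_eq_countP_add_countP (fun N => q c N) (l := pvDirs)
      rw [show pvDirs.length = 6 from rfl] at h
      have hc : pvDirs.countP (fun a => decide ¬(q c a) = true) = pvDirs.countP (fun N => !(q c N)) := by
        refine List.countP_congr (fun a _ => ?_)
        cases q c a <;> simp
      omega
    have h6' : (pvDirs.countP (fun N => q c N) : Int) + (pvDirs.countP (fun N => !(q c N)) : Int) = 6 := by
      exact_mod_cast h6
    omega

lemma pv_sum_map_add (l : List pvCell) (f g : pvCell → Int) :
    (l.map (fun c => f c + g c)).sum = (l.map f).sum + (l.map g).sum := by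
  induction l with
  | nil => simp
  | cons c t ih => simp only [List.map_cons, List.sum_cons, ih]; ring

lemma pv_part1_eq (cells : List pvCell)
    (hunif : ∀ c ∈ PySem.Set.ofList cells, ∀ c' ∈ PySem.Set.ofList cells, c.length = c'.length) :
    pvComputeSurfaceArea (cells.foldl (fun dd c => dd.insert c (1 : Int)) PySem.Dict.empty) none
      = 6 * PySem.Set.len (PySem.Set.ofList cells) -
        2 * ((PySem.Set.ofList cells).map (fun c =>
          (pvPosDirs.countP (fun N => PySem.Set.contains (PySem.Set.ofList cells) (pvAdd c N)) : Int))).sum := by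
  simp only [pvComputeSurfaceArea, Bool.and_true]
  simp only [PySem.List.foldl_count_if, PySem.List.foldl_add, zero_add]
  rw [pvKeys_eq, PySem.Set.len_eq]
  set S := PySem.Set.ofList cells with hSdef
  have hS : S.Nodup := PySem.Set.nodup_ofList cells
  have hc : ∀ c N : pvCell,
      (cells.foldl (fun dd c => dd.insert c (1 : Int)) PySem.Dict.empty).contains (pvAdd c N)
        = PySem.Set.contains S (pvAdd c N) := by
    intro c N
    rw [PySem.Dict.contains_eq_decide_mem_keys, pvKeys_eq, PySem.Set.contains_eq_decide]
  simp only [hc]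
  rw [pv_sum_compl S (fun c N => PySem.Set.contains S (pvAdd c N))]
  have hsplit : (S.map (fun c => (pvDirs.countP (fun N => PySem.Set.contains S (pvAdd c N)) : Int))).sum
      = (S.map (fun c => (pvPosDirs.countP (fun N => PySem.Set.contains S (pvAdd c N)) : Int))).sum
        + (S.map (fun c => (pvNegDirs.countP (fun N => PySem.Set.contains S (pvAdd c N)) : Int))).sum := by
    rw [← pv_sum_map_add]
    refine congrArg List.sum (List.map_congr_left (fun c _ => ?_))
    rw [pv_countP_split]
    push_cast
    ring
  have hflip : (S.map (fun c => (pvNegDirs.countP (fun N => PySem.Set.contains S (pvAdd c N)) : Int))).sum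
      = (S.map (fun c => (pvPosDirs.countP (fun N => PySem.Set.contains S (pvAdd c N)) : Int))).sum := by
    rw [← List.sum_toFinset _ hS, ← List.sum_toFinset _ hS]
    simp only [PySem.Set.contains_eq_decide]
    rw [← Nat.cast_sum, ← Nat.cast_sum]
    exact congrArg _ (pv_flip_sum S hS hunif)
  rw [hsplit, hflip]
  ring

lemma pvLe3Box_card (lo hi : pvCell) :
    (pvLe3Box lo hi).card ≤
      1 + (pvIdx hi 0 + 1 - pvIdx lo 0).toNat
        + (pvIdx hi 0 + 1 - pvIdx lo 0).toNat * (pvIdx hi 1 + 1 - pvIdx lo 1).toNat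
        + (pvIdx hi 0 + 1 - pvIdx lo 0).toNat * (pvIdx hi 1 + 1 - pvIdx lo 1).toNat
            * (pvIdx hi 2 + 1 - pvIdx lo 2).toNat := by
  have h0 : ({([] : pvCell)} : Finset pvCell).card = 1 := rfl
  have h1 : (pvBox1 lo hi).card = (pvIdx hi 0 + 1 - pvIdx lo 0).toNat := by
    simp [pvBox1, pvIccZ]
  have h2 : (pvBox2 lo hi).card
      = (pvIdx hi 0 + 1 - pvIdx lo 0).toNat * (pvIdx hi 1 + 1 - pvIdx lo 1).toNat := by
    simp [pvBox2, pvIccZ]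
  have h3 : (pvBox3 lo hi).card
      = (pvIdx hi 0 + 1 - pvIdx lo 0).toNat * ((pvIdx hi 1 + 1 - pvIdx lo 1).toNat
          * (pvIdx hi 2 + 1 - pvIdx lo 2).toNat) := by
    simp [pvBox3, pvIccZ]
  calc (pvLe3Box lo hi).card
      ≤ (({([] : pvCell)} : Finset pvCell) ∪ pvBox1 lo hi ∪ pvBox2 lo hi).card + (pvBox3 lo hi).card :=
        Finset.card_union_le _ _
    _ ≤ ((({([] : pvCell)} : Finset pvCell) ∪ pvBox1 lo hi).card + (pvBox2 lo hi).card) + (pvBox3 lo hi).card := by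
        have := Finset.card_union_le (({([] : pvCell)} : Finset pvCell) ∪ pvBox1 lo hi) (pvBox2 lo hi)
        omega
    _ ≤ ((({([] : pvCell)} : Finset pvCell).card + (pvBox1 lo hi).card) + (pvBox2 lo hi).card) + (pvBox3 lo hi).card := by
        have := Finset.card_union_le ({([] : pvCell)} : Finset pvCell) (pvBox1 lo hi)
        omega
    _ ≤ _ := by
        rw [h0, h1, h2, h3]
        have := Nat.mul_assoc (pvIdx hi 0 + 1 - pvIdx lo 0).toNat
          (pvIdx hi 1 + 1 - pvIdx lo 1).toNat (pvIdx hi 2 + 1 - pvIdx lo 2).toNat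
        omega

lemma pv_minmax_le (xs : List Int) (h : xs ≠ []) :
    (PySem.List.min? xs (fun x => x)).getD 0 - 1 ≤ (PySem.List.max? xs (fun x => x)).getD 0 + 1 := by
  obtain ⟨x, hx⟩ := List.exists_mem_of_ne_nil xs h
  cases hmin : PySem.List.min? xs (fun x => x) with
  | none => exact absurd ((PySem.List.min?_eq_none_iff xs (fun x => x)).1 hmin) h
  | some m =>
    cases hmax : PySem.List.max? xs (fun x => x) with
    | none => exact absurd ((PySem.List.max?_eq_none_iff xs (fun x => x)).1 hmax) h
    | some M =>
      have h1 := PySem.List.min?_isMin hmin x hx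
      have h2 := PySem.List.max?_isMax hmax x hx
      simp only [Option.getD_some]
      omega

lemma pv_lo_not_mem (S : List pvCell) (hS : S ≠ []) (b2 b3 : Int) :
    ([(PySem.List.min? (S.map (fun c => pvIdx c 0)) (fun x => x)).getD 0 - 1, b2, b3] : pvCell) ∉ S := by
  intro hmem
  have h1 : ((PySem.List.min? (S.map (fun c => pvIdx c 0)) (fun x => x)).getD 0 - 1)
      ∈ S.map (fun c => pvIdx c 0) := by
    refine List.mem_map.2 ⟨_, hmem, ?_⟩
    rfl
  cases h : PySem.List.min? (S.map (fun c => pvIdx c 0)) (fun x => x) with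
  | none =>
    exact hS (List.map_eq_nil_iff.1
      ((PySem.List.min?_eq_none_iff (S.map (fun c => pvIdx c 0)) (fun x => x)).1 h))
  | some m =>
    have hle := PySem.List.min?_isMin h _ h1
    rw [h] at hle
    simp only [Option.getD_some] at hle
    omega

lemma pvBFS_run (cubes : PySem.Set pvCell) (lo hi : pvCell) (fuel : Nat)
    (hbox : lo ∈ pvLe3Box lo hi) (hfuel : (pvLe3Box lo hi).card ≤ fuel) :
    ∀ p, p ∈ pvBFS cubes lo hi fuel (PySem.Set.add PySem.Set.empty lo) [lo] ↔
      pvReach cubes lo hi lo p := by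
  have hv : PySem.Set.add PySem.Set.empty lo = [lo] := by
    have := PySem.Set.add_of_not_mem (s := (PySem.Set.empty : PySem.Set pvCell)) (x := lo)
      (List.not_mem_nil)
    simpa using this
  rw [hv]
  have h := pvBFS_main cubes lo hi lo fuel [lo] [lo]
    (by simp)
    (by intro p hp; rcases List.mem_cons.1 hp with h | h
        · exact h ▸ hbox
        · exact absurd h (List.not_mem_nil))
    (fun f hf => hf)
    (List.mem_cons_self ..)
    (by intro v hv2; rcases List.mem_cons.1 hv2 with h | h
        · exact h ▸ pvReach.base
        · exact absurd h (List.not_mem_nil))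
    (fun v hv2 => Or.inl hv2)
    (by simp only [List.length_cons, List.length_nil]; omega)
  obtain ⟨h1, h2, h3⟩ := h
  intro p
  constructor
  · exact h2 p
  · exact pvReach_mem_of_closed (h1 lo (List.mem_cons_self ..)) h3 p

lemma pv_part2_core (cells : List pvCell) (lo hi : pvCell) (fuel : Nat)
    (hlo : lo ∉ PySem.Set.ofList cells) (hbox : lo ∈ pvLe3Box lo hi)
    (hfuel : (pvLe3Box lo hi).card ≤ fuel) :
    pvComputeSurfaceArea (cells.foldl (fun dd c => dd.insert c (1 : Int)) PySem.Dict.empty)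
      (some (pvALoop (cells.foldl (fun dd c => dd.insert c (1 : Int)) PySem.Dict.empty)
        lo hi PySem.Set.empty [lo]))
    = ((PySem.Set.ofList cells).map (fun c =>
        (pvDirs.countP (fun N => PySem.Set.contains
          (pvBFS (PySem.Set.ofList cells) lo hi fuel (PySem.Set.add PySem.Set.empty lo) [lo])
          (pvAdd c N)) : Int))).sum := by
  set S := PySem.Set.ofList cells with hSdef
  set D := cells.foldl (fun dd c => dd.insert c (1 : Int)) PySem.Dict.empty with hDdef
  have hKs : D.keys = S := pvKeys_eq cells
  set extA := pvALoop D lo hi PySem.Set.empty [lo] with hextA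
  set extB := pvBFS S lo hi fuel (PySem.Set.add PySem.Set.empty lo) [lo] with hextB
  have hA : ∀ p, p ∈ extA ↔ pvReach S lo hi lo p := by
    intro p
    rw [hextA, ← hKs]
    exact pvALoop_run D lo hi p
  have hB : ∀ p, p ∈ extB ↔ pvReach S lo hi lo p := pvBFS_run S lo hi fuel hbox hfuel
  have hRnot : ∀ p, pvReach S lo hi lo p → p ∉ S := pvReach_not_mem hlo
  have hloA : lo ∈ extA := (hA lo).2 pvReach.base
  have hne : extA.isEmpty = false := by
    cases h : extA.isEmpty with
    | false => rfl
    | true =>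
      exfalso
      rw [List.isEmpty_iff] at h
      rw [h] at hloA
      exact absurd hloA (List.not_mem_nil)
  have hDc : ∀ n : pvCell, D.contains n = decide (n ∈ S) := by
    intro n
    rw [PySem.Dict.contains_eq_decide_mem_keys, hKs]
  have hpc : ∀ c N : pvCell,
      (!(decide (pvAdd c N ∈ S)) && decide (pvAdd c N ∈ extA)) = decide (pvAdd c N ∈ extB) := by
    intro c N
    by_cases h : pvAdd c N ∈ extB
    · have hr := (hB _).1 h
      have hnS := hRnot _ hr
      have hA' := (hA _).2 hr
      simp [h, hnS, hA']
    · have hnA : pvAdd c N ∉ extA := fun hx => h ((hB _).2 ((hA _).1 hx))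
      simp [h, hnA]
  simp only [pvComputeSurfaceArea, hne, Bool.false_or]
  simp only [PySem.Set.contains_eq_decide, hDc, hpc]
  simp only [PySem.List.foldl_count_if, PySem.List.foldl_add, zero_add]
  rw [hKs]

lemma pv_main : ∀ (d : String) (part2 : Bool),
    Pre_surface_area_grid d part2 →
    surface_area_grid d part2 = surface_area_grid_alt d part2 := by
  intro d part2 hpre
  unfold surface_area_grid surface_area_grid_alt
  cases hp : pvParse? d with
  | none => rfl
  | some cells =>
    rw [show Pre_surface_area_grid d part2 = ((∀ c ∈ cells, ∀ c' ∈ cells, c.length = c'.length) ∧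
      (part2 = true → cells ≠ [] ∧ ∀ c ∈ cells, c.length = 3)) from by
        unfold Pre_surface_area_grid; rw [hp]] at hpre
    cases part2 with
    | false =>
      simp only [Bool.not_false, if_true]
      refine pv_part1_eq cells ?_
      intro c hc c' hc'
      exact hpre.1 c ((PySem.Set.mem_ofList cells c).1 hc) c' ((PySem.Set.mem_ofList cells c').1 hc')
    | true =>
      simp only [Bool.not_true, Bool.false_eq_true, if_false]
      obtain ⟨hcne, hlen3⟩ := hpre.2 rfl
      have hSne : PySem.Set.ofList cells ≠ [] := by
        obtain ⟨x, hx⟩ := List.exists_mem_of_ne_nil cells hcne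
        exact List.ne_nil_of_mem ((PySem.Set.mem_ofList cells x).2 hx)
      rw [pvKeys_eq]
      set S := PySem.Set.ofList cells with hSdef
      have hxne : S.map (fun c => pvIdx c 0) ≠ [] := by
        simpa [List.map_eq_nil_iff] using hSne
      have hyne : S.map (fun c => pvIdx c 1) ≠ [] := by
        simpa [List.map_eq_nil_iff] using hSne
      have hzne : S.map (fun c => pvIdx c 2) ≠ [] := by
        simpa [List.map_eq_nil_iff] using hSne
      have h1 := pv_minmax_le _ hxne
      have h2 := pv_minmax_le _ hyne
      have h3 := pv_minmax_le _ hzne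
      refine pv_part2_core cells _ _ _ (pv_lo_not_mem S hSne _ _) ?_ ?_
      · refine pvInBox_le3_mem ?_ (by simp)
        simp only [pvInBox, decide_eq_true_eq, pvIdx, List.getD]
        simp only [List.getElem?_cons_zero, List.getElem?_cons_succ, Option.getD_some]
        refine ⟨le_refl _, h1, le_refl _, h2, le_refl _, h3⟩
      · have := pvLe3Box_card
          ([(PySem.List.min? (S.map (fun c => pvIdx c 0)) (fun x => x)).getD 0 - 1,
            (PySem.List.min? (S.map (fun c => pvIdx c 1)) (fun x => x)).getD 0 - 1,
            (PySem.List.min? (S.map (fun c => pvIdx c 2)) (fun x => x)).getD 0 - 1] : pvCell)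
          ([(PySem.List.max? (S.map (fun c => pvIdx c 0)) (fun x => x)).getD 0 + 1,
            (PySem.List.max? (S.map (fun c => pvIdx c 1)) (fun x => x)).getD 0 + 1,
            (PySem.List.max? (S.map (fun c => pvIdx c 2)) (fun x => x)).getD 0 + 1] : pvCell)
        omega

-- ===== VERDICT (by name: the statement is the Claim_ definition above) =====
theorem surface_area_grid_spec : Claim_equal_surface_area_grid := by
  unfold Claim_equal_surface_area_grid Spec_surface_area_grid
  intro d part2 _ hpre
  exact pv_main d part2 hpre
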